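-- pv_equiv track=rewrite | github.com/tsakallioglu/Random-Python-Challenges | number_of_clans.py | numberOfClans
-- ===== SOURCE A (Python) =====
-- def numberOfClans(divisors, k):
--     def div(n):
--         return [i for i in range(1,n+1) if n%i==0]
--
--     divisors.append(1)
--     count=0
--     a=[]
--     for i in range(1,k+1):
--         inter=list(set(divisors) & set(div(i)))
--         try:
--             if a.index(inter)>=0:
--                 continue
--         except:
--             a.append(inter)
--             count += 1
--     return count
-- ===== SOURCE B (Python) =====
-- def numberOfClans(divisors, k):
--     divisors.append(1)
--     if k <= 0:
--         return 0
--     acc = [set() for _ in range(k + 1)]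
--     for d in set(divisors):
--         if 1 <= d <= k:
--             for m in range(d, k + 1, d):
--                 acc[m].add(d)
--     return len({tuple(sorted(acc[i])) for i in range(1, k + 1)})
-- ===== Notes on version B (the rewrite author's own statement) =====
-- stated objective: faster
-- what changed: A trial-divides every i in 1..k against all of range(1,i+1) and dedups the intersections with a linear list.index scan; B sieves once over the multiples of each distinct divisor d <= k and counts distinct clans as a set of canonical sorted tuples. Pre_ excludes inputs where two distinct positive divisors with a common multiple <= k collide modulo 8, on which A's count can depend on CPython's set iteration order (the same clan set may be listed in two orders and counted twice).
-- outside the precondition, e.g. on numberOfClans([0, 0, 9, 0, 8], 20): A returns 4, B returns 3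
import Mathlib
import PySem

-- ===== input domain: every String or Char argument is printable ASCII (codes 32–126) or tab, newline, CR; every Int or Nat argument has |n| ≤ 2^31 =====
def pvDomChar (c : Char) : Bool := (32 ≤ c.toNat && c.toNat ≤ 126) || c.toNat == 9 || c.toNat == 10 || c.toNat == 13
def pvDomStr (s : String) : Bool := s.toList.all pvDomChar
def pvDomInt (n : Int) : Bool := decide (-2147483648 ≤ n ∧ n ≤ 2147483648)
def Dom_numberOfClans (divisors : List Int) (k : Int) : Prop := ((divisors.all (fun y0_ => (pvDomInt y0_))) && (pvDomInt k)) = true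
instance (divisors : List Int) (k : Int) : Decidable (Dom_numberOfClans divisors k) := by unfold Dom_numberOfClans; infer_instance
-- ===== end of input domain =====

-- B replaces A's per-i trial division + list-scan dedup by a sieve over multiples plus
-- canonical sorted tuples.  Equivalence is about the RETURN value; in Python both A and B
-- perform the same observable mutation (divisors.append(1)).

-- ===== PORT A =====
-- A's inner helper: div(n) = [i for i in range(1, n+1) if n % i == 0]
def pvDiv (n : Int) : List Int :=
  (PySem.List.pyRange 1 (n+1) 1).filter (fun i => PySem.Int.mod n i == 0)

-- 'list(set(divisors) & set(div(i)))' is the Set intersection listed in set(divisors)'s order;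
-- under Pre_ (no mod-8 collision between co-occurring positive divisors) CPython lists equal
-- intersection sets identically, so '==' on these lists agrees with CPython there.
-- 'a.index(inter) >= 0' is always true when index succeeds ('continue'); the except branch
-- appends and counts.
def numberOfClans (divisors : List Int) (k : Int) : Int :=
  let divisors1 := divisors ++ [1]
  let r := (PySem.List.pyRange 1 (k+1) 1).foldl (fun st i =>
    let inter : List Int := PySem.Set.inter (PySem.Set.ofList divisors1) (PySem.Set.ofList (pvDiv i))
    match PySem.List.index? st.2 inter with
    | some _ => st
    | none => (st.1 + 1, st.2 ++ [inter])
    ) ((0 : Int), ([] : List (List Int)))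
  r.1

-- ===== PORT B =====
-- sieve: one accumulator set per index 0..k; each relevant divisor d marks its multiples
-- d, 2d, …; the answer is the number of distinct sorted tuples among acc[1..k].
def numberOfClans_alt (divisors : List Int) (k : Int) : Int :=
  let divisors1 := divisors ++ [1]
  if k ≤ 0 then 0
  else
    let acc0 : List (PySem.Set Int) := (PySem.List.pyRange 0 (k+1) 1).map (fun _ => PySem.Set.empty)
    let acc := (PySem.Set.ofList divisors1).foldl (fun a d =>
      if 1 ≤ d ∧ d ≤ k then
        (PySem.List.pyRange d (k+1) d).foldl (fun a m =>
          a.set m.toNat (PySem.Set.add (a.getD m.toNat PySem.Set.empty) d)) a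
      else a) acc0
    ((PySem.Set.ofList ((PySem.List.pyRange 1 (k+1) 1).map (fun i =>
      PySem.List.sorted (acc.getD i.toNat PySem.Set.empty) (fun x => x) false)) : List (List Int)).length : Int)

-- ===== PRECONDITION & SPEC =====
-- Pre_ excludes inputs on which two distinct positive divisors that can divide a common
-- i <= k collide modulo 8 (the width of CPython's small set hash table): there A's count can
-- depend on CPython's set iteration order (the same clan set may be listed in two different
-- orders and be counted twice) — an artefact of A's implementation no one would specify.
def Pre_numberOfClans (divisors : List Int) (k : Int) : Prop :=
  ∀ d1 ∈ divisors ++ [1], ∀ d2 ∈ divisors ++ [1],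
    1 ≤ d1 → 1 ≤ d2 → d1 ≠ d2 → (Int.lcm d1 d2 : Int) ≤ k → d1 % 8 ≠ d2 % 8
instance (divisors : List Int) (k : Int) : Decidable (Pre_numberOfClans divisors k) := by unfold Pre_numberOfClans; infer_instance

def pvWitness_numberOfClans : List Int × Int := ([2, 3, 4], 10)

def Spec_numberOfClans (divisors : List Int) (k : Int) (out : Int) : Prop := out = numberOfClans_alt divisors k
instance (divisors : List Int) (k : Int) (out : Int) : Decidable (Spec_numberOfClans divisors k out) := by unfold Spec_numberOfClans; infer_instance

-- ===== CLAIM (what is proved, stated in full; the proofs are below) =====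
def Claim_equal_numberOfClans : Prop := ∀ (divisors : List Int) (k : Int), Dom_numberOfClans divisors k → Pre_numberOfClans divisors k → Spec_numberOfClans divisors k (numberOfClans divisors k)

-- ===== LEMMAS AND PROOFS =====

-- the per-i intersection A computes, and the Bool predicate both programs in effect filter by
def pvF (divisors1 : List Int) (i : Int) : List Int :=
  PySem.Set.inter (PySem.Set.ofList divisors1) (PySem.Set.ofList (pvDiv i))

def pvP (k j d : Int) : Bool := decide (1 ≤ d) && decide (d ≤ k) && decide (d ∣ j)

lemma mem_pvDiv (n d : Int) : d ∈ pvDiv n ↔ 1 ≤ d ∧ d < n + 1 ∧ d ∣ n := by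
  simp [pvDiv, List.mem_filter, PySem.List.mem_pyRange_one, PySem.Int.mod_eq_zero_iff_dvd, and_assoc]

-- for 1 ≤ i ≤ k, A's intersection is the ≤k-bounded divisor filter of set(divisors1)
lemma pvF_eq_filter (divisors1 : List Int) (k i : Int) (h1 : 1 ≤ i) (h2 : i ≤ k) :
    pvF divisors1 i = (PySem.Set.ofList divisors1).filter (pvP k i) := by
  unfold pvF PySem.Set.inter
  apply List.filter_congr
  intro d hd
  rw [Bool.eq_iff_iff]
  rw [PySem.Set.contains_iff, PySem.Set.mem_ofList, mem_pvDiv]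
  simp only [pvP, Bool.and_eq_true, decide_eq_true_eq]
  constructor
  · rintro ⟨hd1, hdi, hdvd⟩
    exact ⟨⟨hd1, by omega⟩, hdvd⟩
  · rintro ⟨⟨hd1, hdk⟩, hdvd⟩
    exact ⟨hd1, by have := Int.le_of_dvd (by omega) hdvd; omega, hdvd⟩

lemma getD_map_const {α β : Type} (l : List β) (j : Nat) (c : α) :
    (l.map (fun _ => c)).getD j c = c := by
  induction l generalizing j with
  | nil => simp [List.getD]
  | cons x xs ih => cases j <;> simp [List.getD]

lemma foldl_set_length {α : Type} (f : α → α) (e : α) (ms : List Int) (a : List α) :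
    (ms.foldl (fun a m => a.set m.toNat (f (a.getD m.toNat e))) a).length = a.length := by
  induction ms generalizing a with
  | nil => rfl
  | cons m ms ih => rw [List.foldl_cons, ih]; simp

lemma foldl_set_getD {α : Type} (f : α → α) (e : α) :
    ∀ (ms : List Int) (a : List α) (j : Int), ms.Nodup → (∀ m ∈ ms, 0 ≤ m) → 0 ≤ j →
    ((ms.foldl (fun a m => a.set m.toNat (f (a.getD m.toNat e))) a).getD j.toNat e)
      = if j ∈ ms ∧ j.toNat < a.length then f (a.getD j.toNat e) else a.getD j.toNat e := by
  intro ms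
  induction ms with
  | nil => intro a j _ _ _; simp
  | cons m ms ih =>
    intro a j hnd hnn hj
    rw [List.foldl_cons]
    have hnd' := hnd
    rw [List.nodup_cons] at hnd'
    obtain ⟨hm_notmem, hnd2⟩ := hnd'
    have hm0 : 0 ≤ m := hnn m (by simp)
    set a' := a.set m.toNat (f (a.getD m.toNat e)) with ha'
    have hlen : a'.length = a.length := by simp [ha']
    rw [ih a' j hnd2 (fun x hx => hnn x (by simp [hx])) hj, hlen]
    by_cases hjm : j = m
    · subst hjm
      have hnotin : j ∉ ms := hm_notmem
      simp only [hnotin, false_and, if_false, List.mem_cons, true_or, true_and]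
      by_cases hlt : j.toNat < a.length
      · simp only [hlt, if_true]
        simp [ha', List.getD_eq_getElem?_getD, List.getElem?_set_self hlt]
      · simp only [hlt, if_false]
        have : a.set j.toNat (f (a.getD j.toNat e)) = a := List.set_eq_of_length_le (by omega)
        rw [ha', this]
    · have hne : j.toNat ≠ m.toNat := by omega
      have hgd : a'.getD j.toNat e = a.getD j.toNat e := by
        simp [ha', List.getD_eq_getElem?_getD, List.getElem?_set_ne (Ne.symm hne)]
      rw [hgd]
      by_cases hjin : j ∈ ms
      · simp [hjin, hjm]
      · simp [hjin, hjm]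

lemma nodup_pyRange_pos (a b s : Int) (hs : 0 < s) : (PySem.List.pyRange a b s).Nodup := by
  rw [PySem.List.pyRange_of_pos a b hs]
  apply List.Nodup.map _ (List.nodup_range)
  intro x y hxy
  have h2 : s * (x:Int) = s * y := add_left_cancel hxy
  have := mul_left_cancel₀ (by omega : (s:Int) ≠ 0) h2
  exact_mod_cast this

lemma mem_pyRange_mult (d k j : Int) (hd : 1 ≤ d) (hj1 : 1 ≤ j) (hjk : j ≤ k) :
    j ∈ PySem.List.pyRange d (k+1) d ↔ d ∣ j := by
  rw [PySem.List.mem_pyRange_iff_of_pos (by omega)]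
  constructor
  · rintro ⟨-, -, hdvd⟩
    have : d ∣ j - d + d := dvd_add hdvd dvd_rfl
    simpa using this
  · intro hdvd
    refine ⟨Int.le_of_dvd (by omega) hdvd, by omega, ?_⟩
    exact dvd_sub hdvd dvd_rfl

-- B's inner loop: for 1 ≤ d ≤ k, marking the multiples of d adds d exactly to slots j with d ∣ j
lemma inner_char (k d : Int) (hd : 1 ≤ d) (hdk : d ≤ k) (a : List (PySem.Set Int))
    (ha : a.length = (k+1).toNat) (j : Int) (hj1 : 1 ≤ j) (hjk : j ≤ k) :
    (((PySem.List.pyRange d (k+1) d).foldl (fun a m =>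
        a.set m.toNat (PySem.Set.add (a.getD m.toNat PySem.Set.empty) d)) a).getD j.toNat PySem.Set.empty)
      = if d ∣ j then PySem.Set.add (a.getD j.toNat PySem.Set.empty) d
        else a.getD j.toNat PySem.Set.empty := by
  rw [foldl_set_getD (fun s => PySem.Set.add s d) PySem.Set.empty _ a j
      (nodup_pyRange_pos _ _ _ (by omega))
      (fun m hm => by
        rw [PySem.List.mem_pyRange_iff_of_pos (by omega)] at hm
        omega)
      (by omega)]
  have hiff := mem_pyRange_mult d k j hd hj1 hjk
  have hlt : j.toNat < a.length := by omega
  by_cases hdvd : d ∣ j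
  · rw [if_pos ⟨hiff.2 hdvd, hlt⟩, if_pos hdvd]
  · rw [if_neg (fun hc => hdvd (hiff.1 hc.1)), if_neg hdvd]

-- B's outer loop: after sieving the (distinct) divisors ds, slot j holds its start value
-- followed by the divisors of j among ds (in ds order)
lemma outer_char (k : Int) :
    ∀ (ds : List Int) (a : List (PySem.Set Int)), ds.Nodup → a.length = (k+1).toNat →
    (∀ j : Int, 1 ≤ j → j ≤ k → ∀ d ∈ ds, d ∉ a.getD j.toNat PySem.Set.empty) →
    ∀ j : Int, 1 ≤ j → j ≤ k →
    ((ds.foldl (fun a d =>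
        if 1 ≤ d ∧ d ≤ k then
          (PySem.List.pyRange d (k+1) d).foldl (fun a m =>
            a.set m.toNat (PySem.Set.add (a.getD m.toNat PySem.Set.empty) d)) a
        else a) a).getD j.toNat PySem.Set.empty)
      = a.getD j.toNat PySem.Set.empty ++ ds.filter (pvP k j) := by
  intro ds
  induction ds with
  | nil => intro a _ _ _ j _ _; simp
  | cons d ds ih =>
    intro a hnd ha hfresh j hj1 hjk
    rw [List.nodup_cons] at hnd
    obtain ⟨hdnot, hnd2⟩ := hnd
    rw [List.foldl_cons]
    by_cases hdk : 1 ≤ d ∧ d ≤ k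
    · rw [if_pos hdk]
      set a' := (PySem.List.pyRange d (k+1) d).foldl (fun a m =>
            a.set m.toNat (PySem.Set.add (a.getD m.toNat PySem.Set.empty) d)) a with ha'def
      have hlen' : a'.length = (k+1).toNat := by
        rw [ha'def, foldl_set_length (fun s => PySem.Set.add s d) PySem.Set.empty]; exact ha
      have hchar : ∀ j' : Int, 1 ≤ j' → j' ≤ k →
          a'.getD j'.toNat PySem.Set.empty
            = if d ∣ j' then PySem.Set.add (a.getD j'.toNat PySem.Set.empty) d
              else a.getD j'.toNat PySem.Set.empty := by
        intro j' h1 h2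
        exact inner_char k d hdk.1 hdk.2 a ha j' h1 h2
      have hfresh' : ∀ j' : Int, 1 ≤ j' → j' ≤ k → ∀ e ∈ ds, e ∉ a'.getD j'.toNat PySem.Set.empty := by
        intro j' h1 h2 e he
        rw [hchar j' h1 h2]
        have hea : e ∉ a.getD j'.toNat PySem.Set.empty := hfresh j' h1 h2 e (by simp [he])
        have hed : e ≠ d := by rintro rfl; exact hdnot he
        by_cases hdvd : d ∣ j'
        · rw [if_pos hdvd]
          intro hmem
          rcases (PySem.Set.mem_add _ _ _).mp hmem with h | h
          · exact hea h
          · exact hed h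
        · rw [if_neg hdvd]; exact hea
      rw [ih a' hnd2 hlen' hfresh' j hj1 hjk, hchar j hj1 hjk]
      have hnotmem : d ∉ a.getD j.toNat PySem.Set.empty := hfresh j hj1 hjk d (by simp)
      by_cases hdvd : d ∣ j
      · rw [if_pos hdvd, PySem.Set.add_of_not_mem hnotmem]
        have : pvP k j d = true := by simp [pvP, hdk.1, hdk.2, hdvd]
        simp [this, List.append_assoc]
      · rw [if_neg hdvd]
        have : pvP k j d = false := by simp [pvP, hdvd]
        simp [this]
    · rw [if_neg hdk]
      rw [ih a hnd2 ha (fun j' h1 h2 e he => hfresh j' h1 h2 e (by simp [he])) j hj1 hjk]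
      have : pvP k j d = false := by
        simp only [pvP]
        rcases (not_and_or.1 hdk) with h | h <;> simp [h]
      simp [this]

-- A's dedup-and-count loop, in closed form
lemma foldA_count (F : Int → List Int) :
    ∀ (l : List Int) (c : Int) (a : List (List Int)),
    (l.foldl (fun st i =>
      match PySem.List.index? st.2 (F i) with
      | some _ => st
      | none => (st.1 + 1, st.2 ++ [F i])) (c, a))
    = (c + ((PySem.Set.update a (l.map F)).length : Int) - (a.length : Int),
       PySem.Set.update a (l.map F)) := by
  intro l
  induction l with
  | nil => intro c a; simp [PySem.Set.update]
  | cons i l ih =>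
    intro c a
    rw [List.foldl_cons, List.map_cons, PySem.Set.update_cons]
    cases h : PySem.List.index? a (F i) with
    | some v =>
      have hmem : F i ∈ a := by
        rw [← PySem.List.index?_isSome_iff (xs := a) (v := F i), h]; rfl
      simp only []
      rw [ih c a, PySem.Set.add_of_mem hmem]
    | none =>
      have hnmem : F i ∉ a := (PySem.List.index?_eq_none_iff a (F i)).mp h
      simp only []
      rw [ih (c+1) (a ++ [F i]), PySem.Set.add_of_not_mem hnmem]
      rw [Prod.mk.injEq]
      refine ⟨?_, rfl⟩
      simp only [List.length_append, List.length_cons, List.length_nil]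
      push_cast
      ring

-- relabelling the values by a function injective on them does not change the dedup
lemma update_map_of_inj {α β : Type} [BEq α] [LawfulBEq α] [BEq β] [LawfulBEq β] (g : α → β) :
    ∀ (xs : List α) (s : PySem.Set α),
    (∀ x y, x ∈ s ++ xs → y ∈ s ++ xs → g x = g y → x = y) →
    PySem.Set.update (s.map g) (xs.map g) = (PySem.Set.update s xs).map g := by
  intro xs
  induction xs with
  | nil => intro s _; simp [PySem.Set.update]
  | cons x xs ih =>
    intro s hinj
    rw [List.map_cons, PySem.Set.update_cons, PySem.Set.update_cons]
    have hadd : PySem.Set.add (s.map g) (g x) = (PySem.Set.add s x).map g := by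
      by_cases hx : x ∈ s
      · rw [PySem.Set.add_of_mem hx, PySem.Set.add_of_mem (List.mem_map_of_mem hx)]
      · have hgx : g x ∉ s.map g := by
          intro hc
          rcases List.mem_map.mp hc with ⟨y, hy, hgy⟩
          have := hinj y x (by simp [hy]) (by simp) hgy
          exact hx (this ▸ hy)
        rw [PySem.Set.add_of_not_mem hx, PySem.Set.add_of_not_mem hgx, List.map_append]
        rfl
    rw [hadd]
    apply ih
    intro u v hu hv hguv
    apply hinj u v
    · rcases List.mem_append.mp hu with h | h
      · rcases (PySem.Set.mem_add _ _ _).mp h with h' | h'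
        · exact List.mem_append.mpr (Or.inl h')
        · simp [h']
      · simp [h]
    · rcases List.mem_append.mp hv with h | h
      · rcases (PySem.Set.mem_add _ _ _).mp h with h' | h'
        · exact List.mem_append.mpr (Or.inl h')
        · simp [h']
      · simp [h]
    · exact hguv

-- two filters of the same list that are permutations of each other are equal
lemma filter_eq_of_perm {α : Type} (D : List α) (p q : α → Bool)
    (h : (D.filter p).Perm (D.filter q)) : D.filter p = D.filter q := by
  apply List.filter_congr
  intro x hx
  have hm := h.mem_iff (a := x)
  simp only [List.mem_filter] at hm
  cases hp : p x <;> cases hq : q x <;> simp_all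

-- ===== VERDICT (by name: the statement is the Claim_ definition above) =====
theorem numberOfClans_spec : Claim_equal_numberOfClans := by
  intro divisors k _hdom _hpre
  unfold Spec_numberOfClans
  by_cases hk : k ≤ 0
  · have hnil : PySem.List.pyRange 1 (k+1) 1 = [] := PySem.List.pyRange_one_eq_nil (by omega)
    simp [numberOfClans, numberOfClans_alt, hk, hnil]
  · have hk' : 0 < k := by omega
    have hA : numberOfClans divisors k
        = ((PySem.Set.ofList ((PySem.List.pyRange 1 (k+1) 1).map (pvF (divisors ++ [1])))).length : Int) := by
      show ((PySem.List.pyRange 1 (k+1) 1).foldl (fun st i =>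
          match PySem.List.index? st.2 (pvF (divisors ++ [1]) i) with
          | some _ => st
          | none => (st.1 + 1, st.2 ++ [pvF (divisors ++ [1]) i])
          ) ((0 : Int), ([] : List (List Int)))).1 = _
      rw [foldA_count]
      rw [PySem.Set.update_nil_left]
      simp
    have hB : numberOfClans_alt divisors k
        = ((PySem.Set.ofList ((PySem.List.pyRange 1 (k+1) 1).map (fun i =>
            PySem.List.sorted (pvF (divisors ++ [1]) i) (fun x => x) false))).length : Int) := by
      show (if k ≤ 0 then (0:Int) else _) = _
      rw [if_neg hk]
      have hmap : ∀ i ∈ PySem.List.pyRange 1 (k+1) 1,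
          PySem.List.sorted (((PySem.Set.ofList (divisors ++ [1])).foldl (fun a d =>
            if 1 ≤ d ∧ d ≤ k then
              (PySem.List.pyRange d (k+1) d).foldl (fun a m =>
                a.set m.toNat (PySem.Set.add (a.getD m.toNat PySem.Set.empty) d)) a
            else a) ((PySem.List.pyRange 0 (k+1) 1).map (fun _ => PySem.Set.empty))).getD
              i.toNat PySem.Set.empty) (fun x => x) false
          = PySem.List.sorted (pvF (divisors ++ [1]) i) (fun x => x) false := by
        intro i hi
        rw [PySem.List.mem_pyRange_one] at hi
        congr 1
        have hlen0 : ((PySem.List.pyRange 0 (k+1) 1).map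
            (fun _ => (PySem.Set.empty : PySem.Set Int))).length = (k+1).toNat := by
          rw [List.length_map, PySem.List.length_pyRange_one]
          omega
        rw [outer_char k (PySem.Set.ofList (divisors ++ [1])) _
              (PySem.Set.nodup_ofList _) hlen0
              (fun j h1 h2 d hd => by rw [getD_map_const]; simp)
              i hi.1 (by omega)]
        rw [getD_map_const]
        rw [pvF_eq_filter (divisors ++ [1]) k i hi.1 (by omega)]
        rfl
      rw [List.map_congr_left hmap]
    rw [hA, hB]
    have hmm : ((PySem.List.pyRange 1 (k+1) 1).map (fun i =>
        PySem.List.sorted (pvF (divisors ++ [1]) i) (fun x => x) false))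
        = ((PySem.List.pyRange 1 (k+1) 1).map (pvF (divisors ++ [1]))).map
            (fun s => PySem.List.sorted s (fun x => x) false) := by
      rw [List.map_map]; rfl
    rw [hmm]
    have hinj : ∀ x y, x ∈ ([] : List (List Int)) ++ ((PySem.List.pyRange 1 (k+1) 1).map (pvF (divisors ++ [1])))
        → y ∈ ([] : List (List Int)) ++ ((PySem.List.pyRange 1 (k+1) 1).map (pvF (divisors ++ [1])))
        → PySem.List.sorted x (fun x => x) false = PySem.List.sorted y (fun x => x) false → x = y := by
      intro x y hx hy hs
      rw [List.nil_append, List.mem_map] at hx hy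
      obtain ⟨i, hi, rfl⟩ := hx
      obtain ⟨j, hj, rfl⟩ := hy
      rw [PySem.List.mem_pyRange_one] at hi hj
      rw [pvF_eq_filter _ k i hi.1 (by omega), pvF_eq_filter _ k j hj.1 (by omega)] at hs ⊢
      exact filter_eq_of_perm _ _ _ ((PySem.List.sorted_id_eq_sorted_id_iff_perm _ _).mp hs)
    have := update_map_of_inj (fun s => PySem.List.sorted s (fun x => x) false)
      ((PySem.List.pyRange 1 (k+1) 1).map (pvF (divisors ++ [1]))) [] hinj
    rw [List.map_nil] at this
    rw [PySem.Set.update_nil_left] at this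
    rw [PySem.Set.update_nil_left] at this
    rw [this, List.length_map]
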